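-- pv_equiv track=rewrite | github.com/tcfialho/Herald.Ai.Skills | skills/nexus/nexus_dev/scripts/progress_tracker.py | _story_status
-- ===== SOURCE A (Python) =====
-- def _story_status(task_statuses: list[str]) -> str:
--     """Derive story status from its child tasks."""
--     if not task_statuses:
--         return "pending"
--     if all(s in ("completed", "skipped") for s in task_statuses):
--         return "completed"
--     if any(s == "failed" for s in task_statuses):
--         return "failed"
--     if any(s == "in_progress" for s in task_statuses):
--         return "in_progress"
--     if any(s in ("completed", "skipped") for s in task_statuses):
--         return "in_progress"  # Partially done
--     return "pending"
-- ===== SOURCE B (Python) =====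
-- def _story_status(task_statuses: list[str]) -> str:
--     """Derive story status from its child tasks (single counting pass)."""
--     done = failed = in_prog = other = 0
--     for s in task_statuses:
--         if s in ("completed", "skipped"):
--             done += 1
--         elif s == "failed":
--             failed += 1
--         elif s == "in_progress":
--             in_prog += 1
--         else:
--             other += 1
--     if not task_statuses:
--         return "pending"
--     if other + failed + in_prog == 0:
--         return "completed"
--     if failed:
--         return "failed"
--     if in_prog or done:
--         return "in_progress"
--     return "pending"
-- ===== Notes on version B (the rewrite author's own statement) =====
-- stated objective: alternative
-- what changed: B classifies each status once in a single counting pass into four mutually exclusive buckets and then decides the result by arithmetic on the counters, instead of A's up-to-five separate all/any scans of the list.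
import Mathlib
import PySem

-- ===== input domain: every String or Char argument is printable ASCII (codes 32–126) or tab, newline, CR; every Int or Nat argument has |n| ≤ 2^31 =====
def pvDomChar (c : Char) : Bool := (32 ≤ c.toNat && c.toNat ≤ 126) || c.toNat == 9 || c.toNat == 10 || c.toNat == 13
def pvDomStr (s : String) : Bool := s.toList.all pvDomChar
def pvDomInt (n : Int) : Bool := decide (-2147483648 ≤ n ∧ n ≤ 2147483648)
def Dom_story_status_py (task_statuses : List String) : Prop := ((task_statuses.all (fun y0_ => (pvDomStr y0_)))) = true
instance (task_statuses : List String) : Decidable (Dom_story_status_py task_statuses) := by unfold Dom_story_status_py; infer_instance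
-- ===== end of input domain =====

-- B replaces A's repeated all/any scans by one counting pass into four exclusive buckets, then decides by arithmetic on the counters.

-- ===== PORT A =====
def story_status_py (task_statuses : List String) : String :=
  if task_statuses = [] then "pending"
  else if task_statuses.all (fun s => s == "completed" || s == "skipped") then "completed"
  else if task_statuses.any (fun s => s == "failed") then "failed"
  else if task_statuses.any (fun s => s == "in_progress") then "in_progress"
  else if task_statuses.any (fun s => s == "completed" || s == "skipped") then "in_progress"
  else "pending"

-- ===== PORT B =====
-- one pass: (done, failed, in_prog, other) counters, each status lands in exactly one bucket
def ssBuckets (task_statuses : List String) : Nat × Nat × Nat × Nat :=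
  task_statuses.foldl (fun acc s =>
    if s == "completed" || s == "skipped" then (acc.1 + 1, acc.2.1, acc.2.2.1, acc.2.2.2)
    else if s == "failed" then (acc.1, acc.2.1 + 1, acc.2.2.1, acc.2.2.2)
    else if s == "in_progress" then (acc.1, acc.2.1, acc.2.2.1 + 1, acc.2.2.2)
    else (acc.1, acc.2.1, acc.2.2.1, acc.2.2.2 + 1)) (0, 0, 0, 0)

def story_status_py_alt (task_statuses : List String) : String :=
  let b := ssBuckets task_statuses
  if task_statuses = [] then "pending"
  else if b.2.2.2 + b.2.1 + b.2.2.1 = 0 then "completed"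
  else if b.2.1 ≠ 0 then "failed"
  else if b.2.2.1 ≠ 0 ∨ b.1 ≠ 0 then "in_progress"
  else "pending"

-- ===== PRECONDITION & SPEC =====
def Spec_story_status_py (task_statuses : List String) (out : String) : Prop := out = story_status_py_alt task_statuses
instance (task_statuses : List String) (out : String) : Decidable (Spec_story_status_py task_statuses out) := by unfold Spec_story_status_py; infer_instance

-- ===== CLAIM (what is proved, stated in full; the proofs are below) =====
def Claim_equal_story_status_py : Prop := ∀ (task_statuses : List String), Dom_story_status_py task_statuses → Spec_story_status_py task_statuses (story_status_py task_statuses)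

-- ===== LEMMAS AND PROOFS =====

def pDone (s : String) : Bool := s == "completed" || s == "skipped"
def pFail (s : String) : Bool := !(pDone s) && s == "failed"
def pProg (s : String) : Bool := !(pDone s) && !(s == "failed") && s == "in_progress"
def pOther (s : String) : Bool := !(pDone s) && !(s == "failed") && !(s == "in_progress")

theorem ssBuckets_go (ts : List String) : ∀ acc : Nat × Nat × Nat × Nat,
    ts.foldl (fun acc s =>
      if s == "completed" || s == "skipped" then (acc.1 + 1, acc.2.1, acc.2.2.1, acc.2.2.2)
      else if s == "failed" then (acc.1, acc.2.1 + 1, acc.2.2.1, acc.2.2.2)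
      else if s == "in_progress" then (acc.1, acc.2.1, acc.2.2.1 + 1, acc.2.2.2)
      else (acc.1, acc.2.1, acc.2.2.1, acc.2.2.2 + 1)) acc
    = (acc.1 + ts.countP pDone, acc.2.1 + ts.countP pFail,
       acc.2.2.1 + ts.countP pProg, acc.2.2.2 + ts.countP pOther) := by
  induction ts with
  | nil => intro acc; simp
  | cons h t ih =>
      intro acc
      simp only [List.foldl_cons, List.countP_cons]
      by_cases h1 : (h == "completed" || h == "skipped") = true
      · rw [if_pos h1, ih]; simp [pDone, pFail, pProg, pOther, h1]; omega
      · by_cases h2 : (h == "failed") = true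
        · rw [if_neg h1, if_pos h2, ih]
          simp [pDone, pFail, pProg, pOther, h1, h2]; omega
        · by_cases h3 : (h == "in_progress") = true
          · rw [if_neg h1, if_neg h2, if_pos h3, ih]
            simp [pDone, pFail, pProg, pOther, h1, h2, h3]; omega
          · rw [if_neg h1, if_neg h2, if_neg h3, ih]
            simp [pDone, pFail, pProg, pOther, h1, h2, h3]; omega

theorem ssBuckets_eq (ts : List String) :
    ssBuckets ts = (ts.countP pDone, ts.countP pFail, ts.countP pProg, ts.countP pOther) := by
  have := ssBuckets_go ts (0, 0, 0, 0)
  simpa [ssBuckets] using this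

-- the four bucket predicates are exhaustive and exclusive per element
theorem pExcl (s : String) :
    (pOther s = false ∧ pFail s = false ∧ pProg s = false) ↔ pDone s = true := by
  unfold pOther pFail pProg
  cases h1 : pDone s <;> cases h2 : s == "failed" <;> cases h3 : s == "in_progress" <;>
    simp

theorem pFail_eq (s : String) : pFail s = (s == "failed") := by
  by_cases h : s = "failed" <;> simp [pFail, pDone, h]

theorem pProg_eq (s : String) : pProg s = (s == "in_progress") := by
  by_cases h : s = "in_progress" <;> simp [pProg, pDone, h]

theorem countP_zero_iff_any_false {p : String → Bool} (ts : List String) :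
    ts.countP p = 0 ↔ ts.any p = false := by
  simp [List.countP_eq_zero, List.any_eq_false]

theorem sum_zero_iff_all (ts : List String) :
    ts.countP pOther + ts.countP pFail + ts.countP pProg = 0 ↔ ts.all pDone = true := by
  constructor
  · intro h
    rw [List.all_eq_true]
    intro s hs
    have ho := (List.countP_eq_zero.mp (by omega : ts.countP pOther = 0)) s hs
    have hf := (List.countP_eq_zero.mp (by omega : ts.countP pFail = 0)) s hs
    have hp := (List.countP_eq_zero.mp (by omega : ts.countP pProg = 0)) s hs
    exact (pExcl s).mp ⟨Bool.not_eq_true _ ▸ eq_false_of_ne_true ho,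
      eq_false_of_ne_true hf, eq_false_of_ne_true hp⟩
  · intro h
    have ho : ts.countP pOther = 0 := List.countP_eq_zero.mpr fun s hs => by
      have := ((pExcl s).mpr (List.all_eq_true.mp h s hs)).1; simp [this]
    have hf : ts.countP pFail = 0 := List.countP_eq_zero.mpr fun s hs => by
      have := ((pExcl s).mpr (List.all_eq_true.mp h s hs)).2.1; simp [this]
    have hp : ts.countP pProg = 0 := List.countP_eq_zero.mpr fun s hs => by
      have := ((pExcl s).mpr (List.all_eq_true.mp h s hs)).2.2; simp [this]
    omega

theorem countP_pos_of_any {p : String → Bool} (ts : List String)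
    (h : ts.any p = true) : ts.countP p ≠ 0 := by
  intro hz
  rw [countP_zero_iff_any_false] at hz
  simp [h] at hz

-- ===== VERDICT (by name: the statement is the Claim_ definition above) =====
theorem story_status_py_spec : Claim_equal_story_status_py := by
  intro ts _
  unfold Spec_story_status_py story_status_py story_status_py_alt
  by_cases h0 : ts = []
  · simp [h0]
  · simp only [h0, if_false, ssBuckets_eq]
    rw [show (fun s : String => s == "completed" || s == "skipped") = pDone from rfl]
    have hcf : ts.countP pFail = ts.countP (fun s => s == "failed") :=
      List.countP_congr fun s _ => by rw [pFail_eq]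
    have hcp : ts.countP pProg = ts.countP (fun s => s == "in_progress") :=
      List.countP_congr fun s _ => by rw [pProg_eq]
    by_cases hall : ts.all pDone = true
    · have hsum := (sum_zero_iff_all ts).mpr hall
      simp [hall, hsum]
    · have hsum : ¬ (ts.countP pOther + ts.countP pFail + ts.countP pProg = 0) :=
        fun h => hall ((sum_zero_iff_all ts).mp h)
      simp only [hall, if_false, hsum]
      by_cases hfail : ts.any (fun s => s == "failed") = true
      · have : ts.countP pFail ≠ 0 := hcf ▸ countP_pos_of_any ts hfail
        simp [hfail, this]
      · have hf0 : ts.countP pFail = 0 := by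
          rw [hcf, countP_zero_iff_any_false]
          exact eq_false_of_ne_true hfail
        simp only [hfail, if_false, hf0, ne_eq, not_true_eq_false]
        by_cases hprog : ts.any (fun s => s == "in_progress") = true
        · have : ts.countP pProg ≠ 0 := hcp ▸ countP_pos_of_any ts hprog
          simp [hprog, this]
        · have hp0 : ts.countP pProg = 0 := by
            rw [hcp, countP_zero_iff_any_false]
            exact eq_false_of_ne_true hprog
          simp only [hprog, hp0, not_true_eq_false]
          by_cases hdone : ts.any pDone = true
          · have : ts.countP pDone ≠ 0 := countP_pos_of_any ts hdone
            simp [hdone, this]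
          · have hd0 : ts.countP pDone = 0 := by
              rw [countP_zero_iff_any_false]
              exact eq_false_of_ne_true hdone
            simp [hdone, hd0]
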